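-- pv_equiv track=rewrite | github.com/CesareSwift/Tri-gram-Language-Model | code/pre.py | preprocess_line
-- ===== SOURCE A (Python) =====
-- def preprocess_line(text_line):
--     #punctuation list without the '.' character
--     list1 = [chr(i) for i in range(97, 123)]
--     list2 = [chr(i) for i in range(65, 91)]
--     list3 = [chr(i) for i in range(48,58)]
--     list4 = ['.',' ','?','!']
--     clist = list1 + list2 + list3 + list4
--     #remove all the characters in the punctuation list
--     text_line = "".join(chs for chs in text_line.replace('?','.').replace('!','.') if chs in clist )
--     #lowercase all the remaining characters
--     text_line = text_line.lower()
--     #convert all digits to '0'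
--     for i in range(9):
--         text_line = text_line.replace(str(i+1),"0")
--     #add two '#' both in front of and behind of the text_line
--     text_line = '##' + text_line + '#'
--     #return the line after preprocessing
--     return text_line
-- ===== SOURCE B (Python) =====
-- def preprocess_line(text_line):
--     out = []
--     for c in text_line:
--         if c in '.?!':
--             out.append('.')
--         elif c == ' ':
--             out.append(' ')
--         elif 'a' <= c <= 'z':
--             out.append(c)
--         elif 'A' <= c <= 'Z':
--             out.append(chr(ord(c) + 32))
--         elif '0' <= c <= '9':
--             out.append('0')
--     return '##' + ''.join(out) + '#'
-- ===== Notes on version B (the rewrite author's own statement) =====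
-- stated objective: simpler
-- what changed: B replaces A's five separate passes (two replace passes, a membership-filter over a 66-element allowlist, a lower() pass, and nine digit-replace passes) with a single loop that classifies each character once by range comparisons and emits its normalized form.
import Mathlib
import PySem

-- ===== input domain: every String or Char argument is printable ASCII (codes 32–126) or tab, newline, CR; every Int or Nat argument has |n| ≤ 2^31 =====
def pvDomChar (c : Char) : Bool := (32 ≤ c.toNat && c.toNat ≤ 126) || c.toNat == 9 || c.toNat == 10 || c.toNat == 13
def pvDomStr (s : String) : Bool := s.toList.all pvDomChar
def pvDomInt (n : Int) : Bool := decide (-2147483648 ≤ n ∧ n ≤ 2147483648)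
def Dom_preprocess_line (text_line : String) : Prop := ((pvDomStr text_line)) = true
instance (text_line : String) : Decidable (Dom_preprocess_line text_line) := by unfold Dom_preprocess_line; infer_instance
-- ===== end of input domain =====

set_option maxRecDepth 8000
set_option maxHeartbeats 1000000


-- B replaces A's multi-pass replace/filter/lower/digit-replace pipeline by one classifying pass per character (objective: simpler).

-- ===== PORT A =====
def preprocess_line (text_line : String) : String :=
  let list1 := (PySem.List.pyRange 97 123 1).map (fun i => Char.ofNat i.toNat)
  let list2 := (PySem.List.pyRange 65 91 1).map (fun i => Char.ofNat i.toNat)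
  let list3 := (PySem.List.pyRange 48 58 1).map (fun i => Char.ofNat i.toNat)
  let list4 := ['.', ' ', '?', '!']
  let clist := list1 ++ list2 ++ list3 ++ list4
  let t1 := (PySem.Chars.replace (PySem.Chars.replace text_line.toList ['?'] ['.']) ['!'] ['.']).filter
      (fun c => clist.contains c)
  let t2 := PySem.Chars.lower t1
  let t3 := (PySem.List.pyRange 0 9 1).foldl
      (fun s i => PySem.Chars.replace s (PySem.Int.toStr (i + 1)).toList ['0']) t2
  String.mk (['#', '#'] ++ t3 ++ ['#'])

-- ===== PORT B =====
def preprocess_line_alt (text_line : String) : String :=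
  let out := text_line.toList.foldl (fun acc c =>
      if c = '.' ∨ c = '?' ∨ c = '!' then acc ++ ['.']
      else if c = ' ' then acc ++ [' ']
      else if 'a' ≤ c ∧ c ≤ 'z' then acc ++ [c]
      else if 'A' ≤ c ∧ c ≤ 'Z' then acc ++ [Char.ofNat (c.toNat + 32)]
      else if '0' ≤ c ∧ c ≤ '9' then acc ++ ['0']
      else acc) []
  String.mk (['#', '#'] ++ out ++ ['#'])

-- ===== PRECONDITION & SPEC =====
def Spec_preprocess_line (text_line : String) (out : String) : Prop := out = preprocess_line_alt text_line
instance (text_line : String) (out : String) : Decidable (Spec_preprocess_line text_line out) := by unfold Spec_preprocess_line; infer_instance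

-- ===== CLAIM (what is proved, stated in full; the proofs are below) =====
def Claim_equal_preprocess_line : Prop := ∀ (text_line : String), Dom_preprocess_line text_line → Spec_preprocess_line text_line (preprocess_line text_line)

-- ===== LEMMAS AND PROOFS =====

def pvClist : List Char :=
  ((PySem.List.pyRange 97 123 1).map (fun i => Char.ofNat i.toNat)) ++
  ((PySem.List.pyRange 65 91 1).map (fun i => Char.ofNat i.toNat)) ++
  ((PySem.List.pyRange 48 58 1).map (fun i => Char.ofNat i.toNat)) ++
  ['.', ' ', '?', '!']

def pvF (c : Char) : Char :=
  if (if c = '?' then '.' else c) = '!' then '.' else (if c = '?' then '.' else c)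

def pvBemit (c : Char) : Option Char :=
  if c = '.' ∨ c = '?' ∨ c = '!' then some '.'
  else if c = ' ' then some ' '
  else if 'a' ≤ c ∧ c ≤ 'z' then some c
  else if 'A' ≤ c ∧ c ≤ 'Z' then some (Char.ofNat (c.toNat + 32))
  else if '0' ≤ c ∧ c ≤ '9' then some '0'
  else none

lemma pv_replace_go (a b : Char) :
    ∀ (l : List Char) (fuel : Nat) (acc : List Char), l.length ≤ fuel →
      PySem.Chars.replace.go [a] [b] fuel l acc =
        acc.reverse ++ l.map (fun c => if c = a then b else c) := by
  intro l
  induction l with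
  | nil => intro fuel acc _; cases fuel <;> simp [PySem.Chars.replace.go]
  | cons c t ih =>
    intro fuel acc h
    cases fuel with
    | zero => simp at h
    | succ n =>
      simp only [PySem.Chars.replace.go, List.isPrefixOf]
      by_cases hc : c = a
      · subst hc
        simp only [BEq.rfl, Bool.and_true, if_pos,
          show List.drop [c].length (c :: t) = t from rfl,
          ih n (List.reverse [b] ++ acc) (by simpa using h)]
        simp
      · have hbe : (a == c) = false := by
          simp only [beq_eq_false_iff_ne]; exact fun e => hc e.symm
        simp only [hbe, Bool.false_and, Bool.false_eq_true, if_false,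
          ih n (c :: acc) (by simpa using h)]
        simp [hc]

lemma pv_replace_single (a b : Char) (l : List Char) :
    PySem.Chars.replace l [a] [b] = l.map (fun c => if c = a then b else c) := by
  rw [PySem.Chars.replace]
  simp only [List.isEmpty_cons, if_neg Bool.false_ne_true]
  simpa using pv_replace_go a b l l.length [] le_rfl

lemma pv_B_foldl (l : List Char) (acc : List Char) :
    l.foldl (fun acc c =>
      if c = '.' ∨ c = '?' ∨ c = '!' then acc ++ ['.']
      else if c = ' ' then acc ++ [' ']
      else if 'a' ≤ c ∧ c ≤ 'z' then acc ++ [c]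
      else if 'A' ≤ c ∧ c ≤ 'Z' then acc ++ [Char.ofNat (c.toNat + 32)]
      else if '0' ≤ c ∧ c ≤ '9' then acc ++ ['0']
      else acc) acc = acc ++ l.filterMap pvBemit := by
  induction l generalizing acc with
  | nil => simp
  | cons c t ih =>
    rw [List.foldl_cons, ih, List.filterMap_cons]
    simp only [pvBemit]
    split_ifs <;> simp

lemma pv_filter_map_eq_filterMap (q : Char → Bool) (h : Char → Char) (l : List Char) :
    (l.filter q).map h = l.filterMap (fun c => if q c then some (h c) else none) := by
  induction l with
  | nil => rfl
  | cons c t ih =>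
    by_cases hq : q c <;> simp [hq, ih]

lemma pv_clist_bound (c : Char) (h : pvClist.contains c = true) : c.toNat ≤ 126 := by
  rw [List.contains_iff_mem] at h
  have hall : pvClist.all (fun x => decide (x.toNat ≤ 126)) = true := by decide
  simpa using List.all_eq_true.mp hall c h

lemma pv_pointwise (c : Char) :
    Option.map (fun c => if c = '9' then '0' else c)
      (Option.map (fun c => if c = '8' then '0' else c)
        (Option.map (fun c => if c = '7' then '0' else c)
          (Option.map (fun c => if c = '6' then '0' else c)
            (Option.map (fun c => if c = '5' then '0' else c)
              (Option.map (fun c => if c = '4' then '0' else c)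
                (Option.map (fun c => if c = '3' then '0' else c)
                  (Option.map (fun c => if c = '2' then '0' else c)
                    (Option.map (fun c => if c = '1' then '0' else c)
                      (Option.map PySem.Chars.lowerChar
                        (if pvClist.contains (pvF c) = true then some (pvF c) else none)))))))))) =
      pvBemit c := by
  by_cases h128 : c.toNat < 128
  · have key : ∀ n : Nat, n < 128 →
        Option.map (fun c => if c = '9' then '0' else c)
          (Option.map (fun c => if c = '8' then '0' else c)
            (Option.map (fun c => if c = '7' then '0' else c)
              (Option.map (fun c => if c = '6' then '0' else c)
                (Option.map (fun c => if c = '5' then '0' else c)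
                  (Option.map (fun c => if c = '4' then '0' else c)
                    (Option.map (fun c => if c = '3' then '0' else c)
                      (Option.map (fun c => if c = '2' then '0' else c)
                        (Option.map (fun c => if c = '1' then '0' else c)
                          (Option.map PySem.Chars.lowerChar
                            (if pvClist.contains (pvF (Char.ofNat n)) = true then
                              some (pvF (Char.ofNat n)) else none)))))))))) =
          pvBemit (Char.ofNat n) := by decide
    have := key c.toNat h128
    rwa [Char.ofNat_toNat] at this
  · have hq : c ≠ '?' := by intro e; subst e; simp at h128
    have hb : c ≠ '!' := by intro e; subst e; simp at h128
    have hF : pvF c = c := by simp [pvF, hq, hb]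
    have hcont : pvClist.contains (pvF c) = false := by
      rw [hF]
      by_contra h
      have := pv_clist_bound c (by simpa using h)
      omega
    rw [hcont]
    have hd : c ≠ '.' := by intro e; subst e; simp at h128
    have hs : c ≠ ' ' := by intro e; subst e; simp at h128
    have hz : ¬ c ≤ 'z' := by
      intro hle
      have : c.toNat ≤ 122 := Fin.mk_le_mk.mp hle
      omega
    have hZ : ¬ c ≤ 'Z' := by
      intro hle
      have : c.toNat ≤ 90 := Fin.mk_le_mk.mp hle
      omega
    have h9 : ¬ c ≤ '9' := by
      intro hle
      have : c.toNat ≤ 57 := Fin.mk_le_mk.mp hle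
      omega
    simp [pvBemit, hd, hq, hb, hs, hz, hZ, h9]

lemma pv_main (l : List Char) :
    (PySem.List.pyRange 0 9 1).foldl
        (fun s i => PySem.Chars.replace s (PySem.Int.toStr (i + 1)).toList ['0'])
        (PySem.Chars.lower ((PySem.Chars.replace (PySem.Chars.replace l ['?'] ['.']) ['!'] ['.']).filter
          (fun c =>
            (((PySem.List.pyRange 97 123 1).map (fun i => Char.ofNat i.toNat)) ++
             ((PySem.List.pyRange 65 91 1).map (fun i => Char.ofNat i.toNat)) ++
             ((PySem.List.pyRange 48 58 1).map (fun i => Char.ofNat i.toNat)) ++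
             ['.', ' ', '?', '!']).contains c))) = l.filterMap pvBemit := by
  have hrange : PySem.List.pyRange 0 9 1 = [0, 1, 2, 3, 4, 5, 6, 7, 8] := by decide
  rw [hrange]
  simp only [List.foldl_cons, List.foldl_nil]
  rw [pv_replace_single '?' '.', pv_replace_single '!' '.', List.filter_map, PySem.Chars.lower]
  -- the nine digit strings, computed; then each digit replace becomes a map
  rw [show (PySem.Int.toStr ((0 : Int) + 1)).toList = ['1'] from by decide,
      show (PySem.Int.toStr (1 + 1)).toList = ['2'] from by decide,
      show (PySem.Int.toStr (2 + 1)).toList = ['3'] from by decide,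
      show (PySem.Int.toStr (3 + 1)).toList = ['4'] from by decide,
      show (PySem.Int.toStr (4 + 1)).toList = ['5'] from by decide,
      show (PySem.Int.toStr (5 + 1)).toList = ['6'] from by decide,
      show (PySem.Int.toStr (6 + 1)).toList = ['7'] from by decide,
      show (PySem.Int.toStr (7 + 1)).toList = ['8'] from by decide,
      show (PySem.Int.toStr (8 + 1)).toList = ['9'] from by decide]
  rw [pv_replace_single '1' '0', pv_replace_single '2' '0', pv_replace_single '3' '0',
      pv_replace_single '4' '0', pv_replace_single '5' '0', pv_replace_single '6' '0',
      pv_replace_single '7' '0', pv_replace_single '8' '0', pv_replace_single '9' '0']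
  simp only [pv_filter_map_eq_filterMap, List.map_filterMap, List.filterMap_map]
  apply List.filterMap_congr
  intro c _
  exact pv_pointwise c

-- ===== VERDICT (by name: the statement is the Claim_ definition above) =====
theorem preprocess_line_spec : Claim_equal_preprocess_line := by
  intro text_line _
  unfold Spec_preprocess_line
  simp only [preprocess_line, preprocess_line_alt]
  rw [pv_B_foldl, List.nil_append, pv_main]
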